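-- pv_equiv track=rewrite | github.com/nielmclaren/AdventOfCode | 2025/day10/main.py | get_button_only_indices
-- ===== SOURCE A (Python) =====
-- def has_index(buttons, index):
--     for button in buttons:
--         if index in button:
--             return True
--     return False
--
-- def get_button_only_indices(buttons):
--     result = []
--     for button_index, button in enumerate(buttons):
--         remaining_buttons = buttons[button_index+1:]
--         button_result = []
--         for index in button:
--             if not has_index(remaining_buttons, index):
--                 button_result.append(index)
--         result.append(button_result)
--     return result
-- ===== SOURCE B (Python) =====
-- def get_button_only_indices(buttons):
--     last = {}
--     for i, button in enumerate(buttons):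
--         for v in button:
--             last[v] = i
--     return [[v for v in button if last.get(v) == i]
--             for i, button in enumerate(buttons)]
-- ===== Notes on version B (the rewrite author's own statement) =====
-- stated objective: faster
-- what changed: Instead of scanning all later buttons for every index (nested scans), B builds one dict mapping each index value to the position of the last button containing it, then keeps an index iff its last occurrence is the current button.
import Mathlib
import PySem

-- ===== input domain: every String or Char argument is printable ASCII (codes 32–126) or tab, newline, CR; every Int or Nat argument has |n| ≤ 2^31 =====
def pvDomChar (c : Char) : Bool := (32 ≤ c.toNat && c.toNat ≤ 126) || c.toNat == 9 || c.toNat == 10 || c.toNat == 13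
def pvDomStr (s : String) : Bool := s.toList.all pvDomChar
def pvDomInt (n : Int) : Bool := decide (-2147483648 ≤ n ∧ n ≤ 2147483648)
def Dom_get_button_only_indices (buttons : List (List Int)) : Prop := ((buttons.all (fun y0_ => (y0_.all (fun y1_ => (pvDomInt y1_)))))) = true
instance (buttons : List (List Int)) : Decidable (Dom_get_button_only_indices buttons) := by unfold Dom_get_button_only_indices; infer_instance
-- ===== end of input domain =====

-- B replaces A's per-index scan of all later buttons by a single last-occurrence dict (asymptotically faster).


-- ===== PORT A =====
def has_index (buttons : List (List Int)) (index : Int) : Bool :=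
  match buttons with
  | [] => false
  | button :: rest => if button.contains index then true else has_index rest index

def get_button_only_indices (buttons : List (List Int)) : List (List Int) :=
  (PySem.List.enumerate buttons 0).foldl (fun result p =>
    let remaining_buttons := PySem.List.slice buttons (some (p.1 + 1)) none
    let button_result := p.2.foldl (fun br index =>
      if !has_index remaining_buttons index then br ++ [index] else br) []
    result ++ [button_result]) []

-- ===== PORT B =====
def buildLast (buttons : List (List Int)) : PySem.Dict Int Int :=
  (PySem.List.enumerate buttons 0).foldl (fun d p =>
    p.2.foldl (fun d v => d.insert v p.1) d) PySem.Dict.empty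

def get_button_only_indices_alt (buttons : List (List Int)) : List (List Int) :=
  let last := buildLast buttons
  (PySem.List.enumerate buttons 0).map (fun p =>
    p.2.filter (fun v => last.get? v == some p.1))

-- ===== PRECONDITION & SPEC =====
def Spec_get_button_only_indices (buttons : List (List Int)) (out : List (List Int)) : Prop := out = get_button_only_indices_alt buttons
instance (buttons : List (List Int)) (out : List (List Int)) : Decidable (Spec_get_button_only_indices buttons out) := by unfold Spec_get_button_only_indices; infer_instance

-- ===== CLAIM (what is proved, stated in full; the proofs are below) =====
def Claim_equal_get_button_only_indices : Prop := ∀ (buttons : List (List Int)), Dom_get_button_only_indices buttons → Spec_get_button_only_indices buttons (get_button_only_indices buttons)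

-- ===== LEMMAS AND PROOFS =====

-- index (counted from the front) of the LAST list in bs containing v, if any
def lastOcc (bs : List (List Int)) (v : Int) : Option Nat :=
  match bs with
  | [] => none
  | b :: rest =>
    match lastOcc rest v with
    | some k => some (k + 1)
    | none => if v ∈ b then some 0 else none

theorem foldl_insert_const_get? (b : List Int) (d : PySem.Dict Int Int) (s v : Int) :
    (b.foldl (fun d v => d.insert v s) d).get? v =
      if v ∈ b then some s else d.get? v := by
  induction b generalizing d with
  | nil => simp
  | cons x xs ih =>
    simp only [List.foldl_cons, ih, PySem.Dict.get?_insert, List.mem_cons]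
    by_cases hx : v = x <;> by_cases hm : v ∈ xs <;> simp [hx, hm]

theorem buildLast_go_get? (bs : List (List Int)) (v : Int) :
    ∀ (s : Int) (d : PySem.Dict Int Int),
    ((PySem.List.enumerate bs s).foldl (fun d p =>
        p.2.foldl (fun d v => d.insert v p.1) d) d).get? v =
      match lastOcc bs v with
      | some k => some (s + (k : Int))
      | none => d.get? v := by
  induction bs with
  | nil => intro s d; simp [lastOcc]
  | cons b rest ih =>
    intro s d
    rw [PySem.List.enumerate_cons, List.foldl_cons, ih]
    simp only [lastOcc]
    cases hr : lastOcc rest v with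
    | some k => push_cast; ring_nf
    | none =>
      rw [foldl_insert_const_get?]
      by_cases hm : v ∈ b <;> simp [hm]

theorem buildLast_get? (bs : List (List Int)) (v : Int) :
    (buildLast bs).get? v =
      match lastOcc bs v with
      | some k => some ((k : Int))
      | none => none := by
  rw [buildLast, buildLast_go_get?]
  cases lastOcc bs v <;> simp

theorem has_index_eq_isSome (bs : List (List Int)) (v : Int) :
    has_index bs v = (lastOcc bs v).isSome := by
  induction bs with
  | nil => simp [has_index, lastOcc]
  | cons b rest ih =>
    simp only [has_index, lastOcc, ih]
    cases hr : lastOcc rest v with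
    | some k => by_cases hm : v ∈ b <;> simp [hm]
    | none => by_cases hm : v ∈ b <;> simp [hm]

theorem lastOcc_isSome_of_mem (bs : List (List Int)) (k : Nat) (b : List Int) (v : Int)
    (hk : bs[k]? = some b) (hv : v ∈ b) : (lastOcc bs v).isSome := by
  induction bs generalizing k with
  | nil => simp at hk
  | cons c rest ih =>
    cases k with
    | zero =>
      simp only [List.getElem?_cons_zero, Option.some.injEq] at hk
      subst hk
      simp only [lastOcc]
      cases lastOcc rest v <;> simp [hv]
    | succ k =>
      simp only [List.getElem?_cons_succ] at hk
      have := ih k hk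
      simp only [lastOcc]
      cases hr : lastOcc rest v <;> simp_all

theorem lastOcc_eq_iff_drop_none (bs : List (List Int)) (k : Nat) (b : List Int) (v : Int)
    (hk : bs[k]? = some b) (hv : v ∈ b) :
    (lastOcc bs v = some k ↔ lastOcc (bs.drop (k + 1)) v = none) := by
  induction bs generalizing k with
  | nil => simp at hk
  | cons c rest ih =>
    cases k with
    | zero =>
      simp only [List.getElem?_cons_zero, Option.some.injEq] at hk
      subst hk
      simp only [lastOcc, List.drop_succ_cons, List.drop_zero]
      cases hr : lastOcc rest v <;> simp [hv]
    | succ k =>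
      simp only [List.getElem?_cons_succ] at hk
      have hsome := lastOcc_isSome_of_mem rest k b v hk hv
      have hiff := ih k hk
      simp only [lastOcc, List.drop_succ_cons]
      cases hr : lastOcc rest v with
      | none => rw [hr] at hsome; simp at hsome
      | some j =>
        rw [hr] at hiff
        constructor
        · intro h
          cases lastOcc rest v <;> simp_all
        · intro h
          have : j = k := by
            have := hiff.mpr h
            simpa using this
          simp [this]

-- the pointwise filter-condition equality
theorem cond_eq (bs : List (List Int)) (k : Nat) (b : List Int) (v : Int)
    (hk : bs[k]? = some b) (hv : v ∈ b) :
    (!has_index (bs.drop (k + 1)) v) = ((buildLast bs).get? v == some ((k : Nat) : Int)) := by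
  rw [has_index_eq_isSome, buildLast_get?]
  have hsome := lastOcc_isSome_of_mem bs k b v hk hv
  cases hb : lastOcc bs v with
  | none => rw [hb] at hsome; simp at hsome
  | some j =>
    have hiff := lastOcc_eq_iff_drop_none bs k b v hk hv
    rw [hb] at hiff
    by_cases hjk : j = k
    · subst hjk
      have : lastOcc (bs.drop (j + 1)) v = none := hiff.mp rfl
      simp [this]
    · have : lastOcc (bs.drop (k + 1)) v ≠ none := by
        intro h
        exact hjk (by simpa using hiff.mpr h)
      cases hd : lastOcc (bs.drop (k + 1)) v with
      | none => exact absurd hd this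
      | some m =>
        have : ((j : Int) == ((k : Nat) : Int)) = false := by
          simp [hjk]
        simp [this]

-- ===== VERDICT (by name: the statement is the Claim_ definition above) =====
theorem get_button_only_indices_spec : Claim_equal_get_button_only_indices := by
  intro buttons _
  unfold Spec_get_button_only_indices get_button_only_indices get_button_only_indices_alt
  rw [PySem.List.foldl_append_singleton_eq_map]
  simp only [List.nil_append]
  apply List.map_congr_left
  intro p hp
  rw [PySem.List.mem_enumerate_iff] at hp
  obtain ⟨k, hklt, rfl⟩ := hp
  simp only [Int.zero_add]
  rw [PySem.List.foldl_append_if]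
  simp only [List.nil_append]
  have hslice : PySem.List.slice buttons (some ((k : Int) + 1)) none = buttons.drop (k + 1) := by
    have : ((k : Int) + 1) = (((k + 1 : Nat)) : Int) := by push_cast; ring
    rw [this, PySem.List.slice_from_natCast]
  rw [hslice]
  simp only [List.map_id']
  apply List.filter_congr
  intro v hv
  exact cond_eq buttons k buttons[k] v (by simp [hklt]) hv
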